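-- pv_equiv track=rewrite | github.com/ibbad/dna-lceb-web | app/common/app_helpers.py | _find_popular_codon
-- ===== SOURCE A (Python) =====
-- def _find_popular_codon(aa):
--     """
--     This function returns popular codon from a 4+ fold degenerative codon.
--     :param aa: dictionary containing amino acid information.
--     :return:
--     """
--     codons = [c[:2] for c in aa["codons"]]
--     counts = []
--     for i in range(len(codons)):
--         pc = codons[i]
--         count = 0
--         for j in range(len(codons)):
--             if codons[j] == pc:
--                 count += 1
--         counts.append(count)
--     # find index of the higest entry
--     highest = 0
--     for i in range(len(counts)):
--         if counts[i] > counts[highest]: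
--             highest = i
--     return aa["codons"][highest]
-- ===== SOURCE B (Python) =====
-- def _find_popular_codon(aa):
--     """
--     This function returns popular codon from a 4+ fold degenerative codon.
--     Builds a prefix-frequency table in one pass, then lets the built-in max
--     (which keeps the FIRST maximal element) pick the codon, replacing the
--     O(n^2) nested counting loop and the index-tracking argmax loop.
--     :param aa: dictionary containing amino acid information.
--     :return:
--     """
--     codons = aa["codons"]
--     freq = {}
--     for c in codons:
--         p = c[:2]
--         freq[p] = freq.get(p, 0) + 1
--     return max(codons, key=lambda c: freq[c[:2]])
-- ===== Notes on version B (the rewrite author's own statement) =====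
-- stated objective: faster
-- what changed: Replaces the quadratic nested counting loop plus the index-tracking argmax loop by a single-pass prefix frequency table followed by the built-in max with a key (which keeps the first maximal element, preserving the tie-break).
import Mathlib
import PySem

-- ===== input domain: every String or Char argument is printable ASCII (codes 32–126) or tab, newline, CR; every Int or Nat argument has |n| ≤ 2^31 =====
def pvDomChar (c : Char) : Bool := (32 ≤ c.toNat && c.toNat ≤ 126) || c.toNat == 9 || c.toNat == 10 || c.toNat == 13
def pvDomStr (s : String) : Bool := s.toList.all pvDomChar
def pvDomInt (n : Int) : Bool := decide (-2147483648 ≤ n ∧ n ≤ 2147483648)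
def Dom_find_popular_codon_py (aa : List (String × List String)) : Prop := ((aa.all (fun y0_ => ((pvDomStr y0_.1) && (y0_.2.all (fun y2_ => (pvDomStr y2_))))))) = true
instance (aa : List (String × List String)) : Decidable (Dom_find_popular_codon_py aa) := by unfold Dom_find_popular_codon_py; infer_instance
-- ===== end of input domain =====

-- B replaces A's O(n^2) nested counting by a one-pass frequency table plus built-in max; equivalence proved on dicts whose "codons" entry exists and is nonempty.

-- ===== PORT A =====
-- c[:2]
def pvPfx (c : String) : String := PySem.Str.slice c none (some 2)

def find_popular_codon_py (aa : List (String × List String)) : String :=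
  let cod := ((PySem.Dict.mk aa).get? "codons").getD []
  let codons := cod.map (fun c => pvPfx c)
  let counts : List Int := codons.foldl (fun acc pc =>
    acc ++ [codons.foldl (fun cnt c => if c == pc then cnt + 1 else cnt) (0 : Int)]) []
  let highest := (List.range counts.length).foldl
    (fun h i => if counts.getD h 0 < counts.getD i 0 then i else h) 0
  cod.getD highest ""

-- ===== PORT B =====
def find_popular_codon_py_alt (aa : List (String × List String)) : String :=
  let codons := ((PySem.Dict.mk aa).get? "codons").getD []
  let freq := codons.foldl
    (fun d c => let p := pvPfx c; d.insert p (d.getD p 0 + 1))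
    (PySem.Dict.empty : PySem.Dict String Int)
  (PySem.List.max? codons (fun c => freq.getD (pvPfx c) 0)).getD ""

-- ===== PRECONDITION & SPEC =====
-- Pre_ excludes exactly the inputs on which A raises: a missing "codons" key (KeyError)
-- or an empty codon list (IndexError on the final aa["codons"][highest]).
def Pre_find_popular_codon_py (aa : List (String × List String)) : Prop :=
  ((PySem.Dict.mk aa).get? "codons").getD [] ≠ []
instance (aa : List (String × List String)) : Decidable (Pre_find_popular_codon_py aa) := by
  unfold Pre_find_popular_codon_py; infer_instance

def pvWitness_find_popular_codon_py : (List (String × List String)) :=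
  [("codons", ["CTA", "CTC", "CGA"])]

def Spec_find_popular_codon_py (aa : List (String × List String)) (out : String) : Prop := out = find_popular_codon_py_alt aa
instance (aa : List (String × List String)) (out : String) : Decidable (Spec_find_popular_codon_py aa out) := by unfold Spec_find_popular_codon_py; infer_instance

-- ===== CLAIM (what is proved, stated in full; the proofs are below) =====
def Claim_equal_find_popular_codon_py : Prop := ∀ (aa : List (String × List String)), Dom_find_popular_codon_py aa → Pre_find_popular_codon_py aa → Spec_find_popular_codon_py aa (find_popular_codon_py aa)

-- ===== LEMMAS AND PROOFS =====

-- A's argmax-index loop body, abstracted over the counts table.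
def pvArgstep (cs : List Int) (h i : Nat) : Nat := if cs.getD h 0 < cs.getD i 0 then i else h

theorem pvArgstepCases (cs : List Int) (r n : Nat) : pvArgstep cs r n = n ∨ pvArgstep cs r n = r := by
  unfold pvArgstep; split
  · exact Or.inl rfl
  · exact Or.inr rfl

theorem pvFoldMem (n : Nat) (cs : List Int) (h0 : Nat) :
    (List.range n).foldl (pvArgstep cs) h0 = h0 ∨ (List.range n).foldl (pvArgstep cs) h0 < n := by
  induction n with
  | zero => left; rfl
  | succ n ih =>
    rw [List.range_succ, List.foldl_append, List.foldl_cons, List.foldl_nil]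
    rcases pvArgstepCases cs ((List.range n).foldl (pvArgstep cs) h0) n with he | he <;>
      rw [he] <;> rcases ih with h | h <;> omega

theorem pvFoldAgree (n : Nat) (cs : List Int) (x : Int) (hn : n ≤ cs.length)
    (h0 : Nat) (hh0 : h0 < cs.length) :
    (List.range n).foldl (pvArgstep (cs ++ [x])) h0 = (List.range n).foldl (pvArgstep cs) h0 := by
  induction n with
  | zero => rfl
  | succ n ih =>
    have hn' : n ≤ cs.length := Nat.le_of_succ_le hn
    simp only [List.range_succ, List.foldl_append, List.foldl_cons, List.foldl_nil]
    rw [ih hn']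
    have hrlt : (List.range n).foldl (pvArgstep cs) h0 < cs.length := by
      rcases pvFoldMem n cs h0 with h | h <;> omega
    generalize hg : (List.range n).foldl (pvArgstep cs) h0 = r at hrlt ⊢
    unfold pvArgstep
    rw [List.getD_append cs [x] 0 _ hrlt, List.getD_append cs [x] 0 n (by omega)]

theorem pvMaxAppendSingleton {α : Type} (key : α → Int) (L : List α) (a : α) :
    PySem.List.max? (L ++ [a]) key =
      match PySem.List.max? L key with
      | none => some a
      | some m => if key m < key a then some a else some m := by
  simp only [PySem.List.max?, List.foldl_append, List.foldl_cons, List.foldl_nil]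
  rfl

theorem pvMain (key : String → Int) (l : List String) (a : String) :
    (List.range ((l ++ [a]).length)).foldl (pvArgstep ((l ++ [a]).map key)) 0 < (l ++ [a]).length ∧
    PySem.List.max? (l ++ [a]) key =
      some ((l ++ [a]).getD ((List.range ((l ++ [a]).length)).foldl (pvArgstep ((l ++ [a]).map key)) 0) "") := by
  induction l using List.reverseRecOn generalizing a with
  | nil =>
    constructor
    · simp [pvArgstep]
    · simp [pvArgstep, PySem.List.max?]
  | append_singleton l b ih =>
    obtain ⟨ihlt, ihmax⟩ := ih b
    set L := l ++ [b] with hL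
    have hLlen : L.length = l.length + 1 := by simp [hL]
    set cs' := L.map key with hcs'
    have hcs'len : cs'.length = L.length := by simp [hcs']
    set h' := (List.range L.length).foldl (pvArgstep cs') 0 with hh'
    have hmap : (L ++ [a]).map key = cs' ++ [key a] := by simp [hcs']
    have hlen : (L ++ [a]).length = L.length + 1 := by simp
    rw [hmap, hlen, List.range_succ, List.foldl_append, List.foldl_cons, List.foldl_nil]
    have hagree : (List.range L.length).foldl (pvArgstep (cs' ++ [key a])) 0 = h' := by
      rw [pvFoldAgree L.length cs' (key a) (by omega) 0 (by omega)]
    rw [hagree]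
    have hgetn : (cs' ++ [key a]).getD L.length 0 = key a := by
      rw [List.getD_append_right cs' [key a] 0 L.length (by omega)]
      simp [hcs'len]
    have hgeth : (cs' ++ [key a]).getD h' 0 = key (L.getD h' "") := by
      rw [List.getD_append cs' [key a] 0 h' (by omega)]
      rw [List.getD_eq_getElem cs' 0 (by omega), List.getD_eq_getElem L "" (by omega)]
      simp [hcs']
    unfold pvArgstep
    rw [hgetn, hgeth]
    rw [pvMaxAppendSingleton, ihmax]
    split
    next hcmp =>
      refine ⟨by omega, ?_⟩
      have hgl : (L ++ [a]).getD L.length "" = a := by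
        rw [List.getD_append_right L [a] "" L.length (Nat.le_refl _)]; simp
      rw [hgl]
      show (if key (L.getD h' "") < key a then some a else some (L.getD h' "")) = some a
      rw [if_pos hcmp]
    next hcmp =>
      refine ⟨by omega, ?_⟩
      rw [List.getD_append L [a] "" h' (by omega)]
      show (if key (L.getD h' "") < key a then some a else some (L.getD h' "")) = some (L.getD h' "")
      rw [if_neg hcmp]

-- ===== VERDICT (by name: the statement is the Claim_ definition above) =====
theorem find_popular_codon_py_spec : Claim_equal_find_popular_codon_py := by
  intro aa _hdom hpre
  unfold Pre_find_popular_codon_py at hpre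
  simp only [Spec_find_popular_codon_py, find_popular_codon_py, find_popular_codon_py_alt]
  set cod := ((PySem.Dict.mk aa).get? "codons").getD [] with hcod
  set keyA : String → Int := fun c => (((cod.map fun c => pvPfx c).count (pvPfx c) : Nat) : Int) with hkeyA
  have hcounts : (cod.map fun c => pvPfx c).foldl (fun acc pc =>
      acc ++ [(cod.map fun c => pvPfx c).foldl (fun cnt c => if c == pc then cnt + 1 else cnt) (0 : Int)]) [] =
      cod.map keyA := by
    rw [PySem.List.foldl_append_singleton_eq_map]
    have h2 : cod.map keyA = (cod.map fun c => pvPfx c).map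
        (fun p => (((cod.map fun c => pvPfx c).count p : Nat) : Int)) := by
      rw [List.map_map]; rfl
    rw [h2]
    apply List.map_congr_left
    intro pc _
    rw [PySem.List.foldl_beq_add_one]
    simp
  rw [hcounts]
  have hfreq : (cod.foldl (fun d c => (fun p => d.insert p (d.getD p 0 + 1)) (pvPfx c))
      (PySem.Dict.empty : PySem.Dict String Int)) =
      (cod.map fun c => pvPfx c).foldl (fun d x => d.insert x (d.getD x 0 + 1)) PySem.Dict.empty := by
    rw [List.foldl_map]
  have hkeyB : PySem.List.max? cod (fun c =>
      (cod.foldl (fun d c => (fun p => d.insert p (d.getD p 0 + 1)) (pvPfx c))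
        (PySem.Dict.empty : PySem.Dict String Int)).getD (pvPfx c) 0) = PySem.List.max? cod keyA := by
    congr 1
    funext c
    rw [hfreq, PySem.Dict.getD_foldl_insert_add_one]
    simp [hkeyA]
  rcases List.eq_nil_or_concat cod with h | ⟨l, a, h⟩
  · exact absurd h hpre
  rw [List.concat_eq_append] at h
  simp only [List.length_map]
  rw [hkeyB, h]
  obtain ⟨hlt, hmax⟩ := pvMain keyA l a
  rw [hmax]
  rfl
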